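-- pv_equiv track=rewrite | github.com/giacomotre/call_classification | src/classification/prompt_builder.py | parse_classification_response
-- ===== SOURCE A (Python) =====
-- def parse_classification_response(response_text):
--     """
--     Parse the LLM response into main_category and sub_category.
--
--     Expected format:
--         main_category: software
--         sub_category: process_crash
--
--     Returns dict with main_category and sub_category, or None values if parsing fails.
--     """
--     result = {"main_category": None, "sub_category": None}
--
--     for line in response_text.strip().split("\n"):
--         line = line.strip()
--         if line.lower().startswith("main_category:"):
--             result["main_category"] = line.split(":", 1)[1].strip()
--         elif line.lower().startswith("sub_category:"):
--             result["sub_category"] = line.split(":", 1)[1].strip()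
--
--     return result
-- ===== SOURCE B (Python) =====
-- def parse_classification_response(response_text):
--     parsed = {}
--     for line in response_text.strip().split("\n"):
--         key, sep, rest = line.strip().partition(":")
--         if sep:
--             parsed[key.lower()] = rest.strip()
--     return {"main_category": parsed.get("main_category"),
--             "sub_category": parsed.get("sub_category")}
-- ===== Notes on version B (the rewrite author's own statement) =====
-- stated objective: alternative
-- what changed: B replaces A's per-line prefix tests against the two hard-coded keyword-plus-colon strings by a generic one-pass parse: each line is partitioned at its first colon into a lowercased key and stripped value stored in a dict (later lines overwrite), and the two wanted keys are looked up once at the end.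
import Mathlib
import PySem

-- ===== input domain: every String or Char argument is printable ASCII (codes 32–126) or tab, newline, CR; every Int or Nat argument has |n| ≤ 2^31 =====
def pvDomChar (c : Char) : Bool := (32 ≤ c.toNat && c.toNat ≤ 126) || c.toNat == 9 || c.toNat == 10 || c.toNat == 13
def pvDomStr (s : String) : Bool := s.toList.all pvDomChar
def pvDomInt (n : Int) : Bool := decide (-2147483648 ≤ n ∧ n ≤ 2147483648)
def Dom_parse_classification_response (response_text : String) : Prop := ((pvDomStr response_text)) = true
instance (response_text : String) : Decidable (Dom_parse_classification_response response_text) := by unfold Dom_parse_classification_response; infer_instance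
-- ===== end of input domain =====

-- B parses every 'key: value' line into a dict (partition at the first colon, lowercase the key,
-- later lines overwrite) and looks the two wanted keys up once at the end, instead of A's per-line
-- prefix tests against the two hard-coded "key:" strings; same cost, different decomposition.

-- ===== PORT A =====
-- loop body of A's for-loop (kept as a named helper; one step of the fold)
def pvAStep (result : PySem.Dict String (Option String)) (line : String) : PySem.Dict String (Option String) :=
  let line := PySem.Str.strip line
  if PySem.Str.startswith (PySem.Str.lower line) "main_category:" then
    -- line.split(":", 1)[1].strip(); the '.getD ""' is a totality guard only: the startswith
    -- guard ensures a colon, so the split has a second piece (Python would raise IndexError otherwise)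
    result.insert "main_category" (some (PySem.Str.strip ((PySem.List.pyGet? ((PySem.Str.splitMax? line ":" 1).getD []) 1).getD "")))
  else if PySem.Str.startswith (PySem.Str.lower line) "sub_category:" then
    result.insert "sub_category" (some (PySem.Str.strip ((PySem.List.pyGet? ((PySem.Str.splitMax? line ":" 1).getD []) 1).getD "")))
  else result

def parse_classification_response (response_text : String) : List (String × Option String) :=
  let result : PySem.Dict String (Option String) := ⟨[("main_category", none), ("sub_category", none)]⟩
  -- split? with the nonempty separator "\n" is never none; getD [] is a totality guard
  (((PySem.Str.split? (PySem.Str.strip response_text) "\n").getD []).foldl pvAStep result).items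

-- ===== PORT B =====
-- hand port of str.partition(":") (exact): some (before, after) around the FIRST colon, none if no colon
-- (Python's 3-tuple with empty separator corresponds to the none case)
def pvPartitionColon : List Char → Option (List Char × List Char)
  | [] => none
  | c :: cs => if c = ':' then some ([], cs)
               else (pvPartitionColon cs).map (fun p => (c :: p.1, p.2))

-- loop body of B's for-loop
def pvBStep (parsed : PySem.Dict String String) (line : String) : PySem.Dict String String :=
  match pvPartitionColon (PySem.Chars.strip line.toList) with
  | some (key, rest) =>
      parsed.insert (String.ofList (PySem.Chars.lower key)) (String.ofList (PySem.Chars.strip rest))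
  | none => parsed

def parse_classification_response_alt (response_text : String) : List (String × Option String) :=
  let parsed := ((PySem.Str.split? (PySem.Str.strip response_text) "\n").getD []).foldl pvBStep (⟨[]⟩ : PySem.Dict String String)
  [("main_category", parsed.get? "main_category"), ("sub_category", parsed.get? "sub_category")]

-- ===== PRECONDITION & SPEC =====
def Spec_parse_classification_response (response_text : String) (out : List (String × Option String)) : Prop := out = parse_classification_response_alt response_text
instance (response_text : String) (out : List (String × Option String)) : Decidable (Spec_parse_classification_response response_text out) := by unfold Spec_parse_classification_response; infer_instance

-- ===== CLAIM (what is proved, stated in full; the proofs are below) =====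
def Claim_equal_parse_classification_response : Prop := ∀ (response_text : String), Dom_parse_classification_response response_text → Spec_parse_classification_response response_text (parse_classification_response response_text)

-- ===== LEMMAS AND PROOFS =====

-- A's per-key update, summarised over one line (proof-side helpers)
def pvAVal (line : String) : String :=
  PySem.Str.strip ((PySem.List.pyGet? ((PySem.Str.splitMax? (PySem.Str.strip line) ":" 1).getD []) 1).getD "")

def pvAMain (a : Option String) (line : String) : Option String :=
  if PySem.Str.startswith (PySem.Str.lower (PySem.Str.strip line)) "main_category:" then some (pvAVal line) else a

def pvASub (a : Option String) (line : String) : Option String :=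
  if PySem.Str.startswith (PySem.Str.lower (PySem.Str.strip line)) "sub_category:" then some (pvAVal line) else a

-- B's per-key update, summarised over one line
def pvBKey (target : String) (a : Option String) (line : String) : Option String :=
  match pvPartitionColon (PySem.Chars.strip line.toList) with
  | some (k, r) => if target = String.ofList (PySem.Chars.lower k) then some (String.ofList (PySem.Chars.strip r)) else a
  | none => a

theorem pvLowerChar_colon (c : Char) : PySem.Chars.lowerChar c = ':' ↔ c = ':' := by
  unfold PySem.Chars.lowerChar PySem.Chars.isupper
  split_ifs with h
  · simp only [Bool.and_eq_true, decide_eq_true_eq, Char.le_def, UInt32.le_iff_toNat_le] at h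
    have h1 : 65 ≤ c.toNat := h.1
    have h2 : c.toNat ≤ 90 := h.2
    constructor
    · intro hc
      have := congrArg Char.toNat hc
      rw [Char.toNat_ofNat] at this
      have hcol : (':' : Char).toNat = 58 := rfl
      rw [hcol] at this
      split_ifs at this <;> omega
    · intro hc; subst hc; simp [Char.toNat] at h1
  · rfl

theorem pvStartswith_key (t w : List Char) (hw : ':' ∉ w) :
    (PySem.Chars.startswith (PySem.Chars.lower t) (w ++ [':']) = true ↔
      ∃ k r, pvPartitionColon t = some (k, r) ∧ PySem.Chars.lower k = w) := by
  induction t generalizing w with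
  | nil =>
      simp [PySem.Chars.startswith, PySem.Chars.lower, pvPartitionColon, List.isPrefixOf]
  | cons c cs ih =>
      by_cases hc : c = ':'
      · subst hc
        cases w with
        | nil =>
            simp [PySem.Chars.startswith, PySem.Chars.lower, pvPartitionColon, List.isPrefixOf,
              PySem.Chars.lowerChar, PySem.Chars.isupper]
        | cons a w' =>
            have ha : a ≠ ':' := fun h => hw (h ▸ List.mem_cons_self)
            simp [PySem.Chars.startswith, PySem.Chars.lower, pvPartitionColon, List.isPrefixOf]
            intro h
            exact absurd h ha
      · cases w with
        | nil =>
            simp only [PySem.Chars.startswith, PySem.Chars.lower, List.map_cons, List.nil_append,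
              pvPartitionColon, if_neg hc, List.isPrefixOf]
            constructor
            · intro h
              have : PySem.Chars.lowerChar c = ':' := by
                simp only [Bool.and_eq_true, beq_iff_eq] at h
                exact h.1.symm
              exact absurd ((pvLowerChar_colon c).mp this) hc
            · rintro ⟨k, r, hp, hk⟩
              rcases Option.map_eq_some_iff.mp hp with ⟨⟨k', r'⟩, hp', he⟩
              simp at he
              rw [← he.1] at hk
              simp [PySem.Chars.lower] at hk
        | cons a w' =>
            have hw' : ':' ∉ w' := fun h => hw (List.mem_cons_of_mem _ h)
            simp only [PySem.Chars.startswith, PySem.Chars.lower, List.map_cons, List.cons_append,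
              pvPartitionColon, if_neg hc, List.isPrefixOf, Bool.and_eq_true, beq_iff_eq]
            rw [show (List.isPrefixOf (w' ++ [':']) (List.map PySem.Chars.lowerChar cs) : Bool) =
                  PySem.Chars.startswith (PySem.Chars.lower cs) (w' ++ [':']) from rfl]
            constructor
            · rintro ⟨hac, hsw⟩
              rcases (ih w' hw').mp hsw with ⟨k, r, hp, hk⟩
              exact ⟨c :: k, r, by simp [hp], by simp [PySem.Chars.lower] at hk ⊢; exact ⟨hac.symm, hk⟩⟩
            · rintro ⟨k, r, hp, hk⟩
              rcases Option.map_eq_some_iff.mp hp with ⟨⟨k', r'⟩, hp', he⟩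
              simp at he
              rw [← he.1] at hk
              simp [PySem.Chars.lower] at hk
              exact ⟨hk.1.symm, (ih w' hw').mpr ⟨k', r', by simp [hp', he.2], hk.2⟩⟩

theorem pvGo0 (fuel : Nat) (rest : List Char) (acc : List (List Char)) :
    PySem.Chars.splitOnMax.go [':'] fuel 0 rest [] acc = (rest :: acc).reverse := by
  cases fuel <;> cases rest <;> simp [PySem.Chars.splitOnMax.go]

theorem pvGo1 (l : List Char) (fuel : Nat) (cur : List Char) (acc : List (List Char))
    (hf : l.length ≤ fuel) :
    PySem.Chars.splitOnMax.go [':'] fuel 1 l cur acc =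
      (match pvPartitionColon l with
        | none => ((cur.reverse ++ l) :: acc).reverse
        | some (k, r) => (r :: (cur.reverse ++ k) :: acc).reverse) := by
  induction l generalizing fuel cur acc with
  | nil => cases fuel <;> simp [PySem.Chars.splitOnMax.go, pvPartitionColon]
  | cons c cs ih =>
      cases fuel with
      | zero => simp at hf
      | succ f =>
          by_cases hc : c = ':'
          · subst hc
            simp only [PySem.Chars.splitOnMax.go, List.isPrefixOf, beq_self_eq_true,
              Bool.true_and, if_true, pvPartitionColon]
            rw [if_neg (by omega : ¬ (1 : Nat) = 0),
              show List.drop ([':'] : List Char).length (':' :: cs) = cs from rfl, pvGo0]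
            simp
          · have hpre : ([':'].isPrefixOf (c :: cs) : Bool) = false := by
              simp [List.isPrefixOf]; exact fun h => hc h.symm
            simp only [PySem.Chars.splitOnMax.go]
            rw [if_neg (by omega : ¬ (1 : Nat) = 0), if_neg (by simp [hpre])]
            rw [ih f (c :: cur) acc (by simp at hf; omega)]
            cases hp : pvPartitionColon cs with
            | none => simp [pvPartitionColon, if_neg hc, hp]
            | some p => cases p with
              | mk k r => simp [pvPartitionColon, if_neg hc, hp]

theorem pvSplitMax1 (t : List Char) :
    PySem.Chars.splitMax? t [':'] 1 =
      some (match pvPartitionColon t with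
        | none => [t]
        | some (k, r) => [k, r]) := by
  simp only [PySem.Chars.splitMax?, PySem.Chars.splitOnMax, List.isEmpty_cons]
  rw [if_neg (by omega : ¬ (1 : Int) < 0)]
  rw [show ((1 : Int)).toNat = 1 from rfl]
  rw [pvGo1 t (t.length + 1) [] [] (by omega)]
  cases hp : pvPartitionColon t with
  | none => simp
  | some p => cases p with | mk k r => simp

theorem pvNotBoth (s : String) :
    ¬ (PySem.Str.startswith s "main_category:" = true ∧ PySem.Str.startswith s "sub_category:" = true) := by
  rintro ⟨h1, h2⟩
  rw [PySem.Str.startswith_eq, PySem.Chars.startswith_iff] at h1 h2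
  rcases h1 with ⟨t1, ht1⟩
  rcases h2 with ⟨t2, ht2⟩
  rw [← ht1] at ht2
  rw [show ("main_category:" : String).toList = 'm' :: "ain_category:".toList from rfl,
    show ("sub_category:" : String).toList = 's' :: "ub_category:".toList from rfl] at ht2
  simp at ht2

theorem pvInsMain (x y : Option String) (v : Option String) :
    (⟨[("main_category", x), ("sub_category", y)]⟩ : PySem.Dict String (Option String)).insert "main_category" v
      = ⟨[("main_category", v), ("sub_category", y)]⟩ := by
  simp [PySem.Dict.insert, PySem.Dict.contains]

theorem pvInsSub (x y : Option String) (v : Option String) :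
    (⟨[("main_category", x), ("sub_category", y)]⟩ : PySem.Dict String (Option String)).insert "sub_category" v
      = ⟨[("main_category", x), ("sub_category", v)]⟩ := by
  simp [PySem.Dict.insert, PySem.Dict.contains]

theorem pvAfold (lines : List String) (x y : Option String) :
    List.foldl pvAStep ⟨[("main_category", x), ("sub_category", y)]⟩ lines =
      ⟨[("main_category", List.foldl pvAMain x lines), ("sub_category", List.foldl pvASub y lines)]⟩ := by
  induction lines generalizing x y with
  | nil => rfl
  | cons line rest ih =>
      simp only [List.foldl_cons]
      rw [show pvAStep ⟨[("main_category", x), ("sub_category", y)]⟩ line =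
            ⟨[("main_category", pvAMain x line), ("sub_category", pvASub y line)]⟩ from ?_]
      · exact ih _ _
      · unfold pvAStep pvAMain pvASub pvAVal
        dsimp only
        split_ifs with h1 h2 h3
        · exact absurd ⟨h1, h2⟩ (pvNotBoth _)
        · rw [pvInsMain]
        · rw [pvInsSub]
        · rfl

theorem pvBget (lines : List String) (p : PySem.Dict String String) (target : String) :
    (List.foldl pvBStep p lines).get? target =
      List.foldl (pvBKey target) (p.get? target) lines := by
  induction lines generalizing p with
  | nil => rfl
  | cons line rest ih =>
      simp only [List.foldl_cons]
      rw [ih]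
      congr 1
      unfold pvBStep pvBKey
      cases hp : pvPartitionColon (PySem.Chars.strip line.toList) with
      | none => rfl
      | some kr =>
          cases kr with
          | mk k r => simp [PySem.Dict.get?_insert]

theorem pvStrip_ofList (r : List Char) :
    PySem.Str.strip (String.ofList r) = String.ofList (PySem.Chars.strip r) := by
  apply String.toList_inj.mp
  simp [PySem.Str.toList_strip]

-- A's step for one target key equals B's summarised step for the same key
theorem pvStepEq (w wc : String) (hw : ':' ∉ w.toList) (hwc : wc.toList = w.toList ++ [':'])
    (a : Option String) (line : String) :
    (if PySem.Str.startswith (PySem.Str.lower (PySem.Str.strip line)) wc then some (pvAVal line) else a)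
      = pvBKey w a line := by
  have hstart : PySem.Str.startswith (PySem.Str.lower (PySem.Str.strip line)) wc
      = PySem.Chars.startswith (PySem.Chars.lower (PySem.Chars.strip line.toList)) (w.toList ++ [':']) := by
    rw [PySem.Str.startswith_eq, PySem.Str.toList_lower, PySem.Str.toList_strip, hwc]
  unfold pvBKey
  cases hp : pvPartitionColon (PySem.Chars.strip line.toList) with
  | none =>
      rw [hstart, if_neg]
      intro h
      rcases (pvStartswith_key _ _ hw).mp h with ⟨k, r, hk, _⟩
      rw [hp] at hk
      simp at hk
  | some kr =>
      cases kr with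
      | mk k r =>
        dsimp only
        by_cases hk : PySem.Chars.lower k = w.toList
        · have hwk : w = String.ofList (PySem.Chars.lower k) := by
            rw [hk]; exact String.ofList_toList.symm
          have hsm : PySem.Str.splitMax? (PySem.Str.strip line) ":" 1
              = some [String.ofList k, String.ofList r] := by
            unfold PySem.Str.splitMax?
            rw [PySem.Str.toList_strip]
            rw [show (":" : String).toList = [':'] from rfl]
            rw [pvSplitMax1, hp]
            rfl
          have hval : pvAVal line = String.ofList (PySem.Chars.strip r) := by
            unfold pvAVal
            rw [hsm]
            simp [PySem.List.pyGet?, PySem.List.pyIdx?, pvStrip_ofList]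
          rw [hstart, if_pos ((pvStartswith_key _ _ hw).mpr ⟨k, r, hp, hk⟩), if_pos hwk, hval]
        · rw [hstart, if_neg, if_neg]
          · intro he
            apply hk
            have := congrArg String.toList he
            simpa using this.symm
          · intro h
            rcases (pvStartswith_key _ _ hw).mp h with ⟨k', r', hk', hl⟩
            rw [hp] at hk'
            injection hk' with h2
            injection h2 with h3 h4
            exact hk (h3 ▸ hl)

-- ===== VERDICT (by name: the statement is the Claim_ definition above) =====
theorem parse_classification_response_spec : Claim_equal_parse_classification_response := by
  intro response_text _
  unfold Spec_parse_classification_response parse_classification_response parse_classification_response_alt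
  dsimp only
  rw [pvAfold]
  rw [pvBget, pvBget]
  have hget : (⟨[]⟩ : PySem.Dict String String).get? "main_category" = none := rfl
  have hget2 : (⟨[]⟩ : PySem.Dict String String).get? "sub_category" = none := rfl
  rw [hget, hget2]
  have hmain : pvAMain = pvBKey "main_category" := by
    funext a line
    exact pvStepEq "main_category" "main_category:" (by decide) rfl a line
  have hsub : pvASub = pvBKey "sub_category" := by
    funext a line
    exact pvStepEq "sub_category" "sub_category:" (by decide) rfl a line
  rw [show pvAMain = pvBKey "main_category" from hmain, show pvASub = pvBKey "sub_category" from hsub]
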